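-- pv_equiv track=rewrite | github.com/nkapotoxin/fs_spc111t_plus_hc | nova/huawei/utils.py | is_valid_boot_option
-- ===== SOURCE A (Python) =====
-- SUPPORTED_BOOT_DEVS = ['hd', 'network', 'cdrom']
--
-- def is_valid_boot_option(boot_option):
--     """
--     arguments:
--             boot_option: boot option string like 'hd,network'
--     """
--     boot_option_list = boot_option.split(',')
--     if len(boot_option_list) != len(set(boot_option_list)):
--         return False
--     for boot_dev in boot_option_list:
--         if boot_dev not in SUPPORTED_BOOT_DEVS:
--             return False
--     return True
-- ===== SOURCE B (Python) =====
-- SUPPORTED_BOOT_DEVS = ['hd', 'network', 'cdrom']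
--
-- # All valid boot-option strings: every ordering of every non-empty subset of the
-- # three supported devices, joined by commas -- 15 strings in total.
-- _VALID_BOOT_OPTIONS = frozenset([
--     'hd', 'network', 'cdrom',
--     'hd,network', 'hd,cdrom', 'network,hd', 'network,cdrom',
--     'cdrom,hd', 'cdrom,network',
--     'hd,network,cdrom', 'hd,cdrom,network',
--     'network,hd,cdrom', 'network,cdrom,hd',
--     'cdrom,hd,network', 'cdrom,network,hd',
-- ])
--
-- def is_valid_boot_option(boot_option):
--     return boot_option in _VALID_BOOT_OPTIONS
-- ===== Notes on version B (the rewrite author's own statement) =====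
-- stated objective: alternative
-- what changed: Replaced A's split-dedup-and-scan validation by a single membership test in a precomputed table of all 15 valid strings (every ordering of every non-empty subset of the three supported devices).
import Mathlib
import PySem

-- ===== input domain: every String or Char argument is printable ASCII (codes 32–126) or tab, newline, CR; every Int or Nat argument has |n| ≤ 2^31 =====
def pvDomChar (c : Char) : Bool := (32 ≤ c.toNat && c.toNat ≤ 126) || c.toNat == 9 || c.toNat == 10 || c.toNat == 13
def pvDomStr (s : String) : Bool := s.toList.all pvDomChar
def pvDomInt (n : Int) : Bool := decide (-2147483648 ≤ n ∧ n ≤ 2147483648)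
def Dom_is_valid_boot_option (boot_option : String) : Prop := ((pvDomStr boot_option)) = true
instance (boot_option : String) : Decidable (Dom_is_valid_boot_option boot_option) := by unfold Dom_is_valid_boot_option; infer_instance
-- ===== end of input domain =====

-- B replaces A's split-then-check loop by a single membership test in the precomputed
-- table of all 15 valid strings (every ordering of every non-empty subset of the three
-- supported devices); objective: alternative (O(1)-table lookup instead of parsing).

def SUPPORTED_BOOT_DEVS : List String := ["hd", "network", "cdrom"]

-- ===== PORT A =====
-- A's for-loop: return False on the first unsupported device, True at the end
def pvALoop : List String → Bool
  | [] => true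
  | d :: rest => if !(SUPPORTED_BOOT_DEVS.contains d) then false else pvALoop rest

def is_valid_boot_option (boot_option : String) : Bool :=
  let boot_option_list := (PySem.Str.split? boot_option ",").getD []
  if boot_option_list.length ≠ (PySem.Set.ofList boot_option_list).length then false
  else pvALoop boot_option_list

-- ===== PORT B =====
-- Source B's frozenset literal of the 15 valid boot-option strings
def pvVALID_BOOT_OPTIONS : PySem.Set String :=
  PySem.Set.ofList
    ["hd", "network", "cdrom",
     "hd,network", "hd,cdrom", "network,hd", "network,cdrom",
     "cdrom,hd", "cdrom,network",
     "hd,network,cdrom", "hd,cdrom,network",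
     "network,hd,cdrom", "network,cdrom,hd",
     "cdrom,hd,network", "cdrom,network,hd"]

def is_valid_boot_option_alt (boot_option : String) : Bool :=
  PySem.Set.contains pvVALID_BOOT_OPTIONS boot_option

-- ===== PRECONDITION & SPEC =====
def Spec_is_valid_boot_option (boot_option : String) (out : Bool) : Prop := out = is_valid_boot_option_alt boot_option
instance (boot_option : String) (out : Bool) : Decidable (Spec_is_valid_boot_option boot_option out) := by unfold Spec_is_valid_boot_option; infer_instance

-- ===== CLAIM (what is proved, stated in full; the proofs are below) =====
def Claim_equal_is_valid_boot_option : Prop := ∀ (boot_option : String), Dom_is_valid_boot_option boot_option → Spec_is_valid_boot_option boot_option (is_valid_boot_option boot_option)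

-- ===== LEMMAS AND PROOFS =====

-- The 15 valid strings, as a plain list (same order as the table in PORT B)
def VALID15 : List String :=
  ["hd", "network", "cdrom",
   "hd,network", "hd,cdrom", "network,hd", "network,cdrom",
   "cdrom,hd", "cdrom,network",
   "hd,network,cdrom", "hd,cdrom,network",
   "network,hd,cdrom", "network,cdrom,hd",
   "cdrom,hd,network", "cdrom,network,hd"]

-- The corresponding 15 token lists
def L15 : List (List String) :=
  [["hd"], ["network"], ["cdrom"],
   ["hd","network"], ["hd","cdrom"], ["network","hd"], ["network","cdrom"],
   ["cdrom","hd"], ["cdrom","network"],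
   ["hd","network","cdrom"], ["hd","cdrom","network"],
   ["network","hd","cdrom"], ["network","cdrom","hd"],
   ["cdrom","hd","network"], ["cdrom","network","hd"]]

-- a clean structural model of splitting a char list on ','
def split1 : List Char → List (List Char)
  | [] => [[]]
  | c :: rest => if c = ',' then [] :: split1 rest else (split1 rest).modifyHead (c :: .)

theorem split1_ne_nil (l : List Char) : split1 l ≠ [] := by
  cases l with
  | nil => simp [split1]
  | cons c rest =>
      simp only [split1]
      split
      · simp
      · cases h : split1 rest with
        | nil => exact absurd h (split1_ne_nil rest)
        | cons a t => simp

theorem intercalate_cc (s x y : List Char) (t : List (List Char)) :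
    List.intercalate s (x :: y :: t) = x ++ s ++ List.intercalate s (y :: t) := by
  simp [List.intercalate]

theorem go_spec (l : List Char) : ∀ (fuel : Nat) (cur : List Char) (acc : List (List Char)),
    l.length < fuel →
    PySem.Chars.splitOn.go [','] fuel l cur acc
      = acc.reverse ++ (split1 l).modifyHead (cur.reverse ++ .) := by
  induction l with
  | nil =>
      intro fuel cur acc h
      match fuel, h with
      | fuel + 1, _ =>
        rw [PySem.Chars.splitOn.go.eq_2 _ _ _ _ (by omega)]
        simp [split1]
  | cons c rest ih =>
      intro fuel cur acc h
      match fuel, h with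
      | fuel + 1, h =>
        rw [PySem.Chars.splitOn.go.eq_3]
        by_cases hc : c = ','
        · subst hc
          have hp : [','].isPrefixOf (',' :: rest) = true := by simp [List.isPrefixOf]
          rw [if_pos hp]
          have hd : List.drop ([','].length) (',' :: rest) = rest := by simp
          rw [hd, ih fuel [] _ (by simpa using h)]
          cases h1 : split1 rest <;> simp [split1, h1]
        · have hp : [','].isPrefixOf (c :: rest) = false := by
            simp [List.isPrefixOf]
            exact fun hh => hc hh.symm
          rw [if_neg (by simp [hp])]
          rw [ih fuel (c :: cur) acc (by simpa using h)]
          simp only [split1, if_neg hc]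
          cases h1 : split1 rest with
          | nil => exact absurd h1 (split1_ne_nil rest)
          | cons a t => simp

theorem splitOn_comma (l : List Char) :
    PySem.Chars.splitOn l [','] = split1 l := by
  rw [PySem.Chars.splitOn, go_spec l (l.length + 1) [] [] (by omega)]
  cases h1 : split1 l with
  | nil => exact absurd h1 (split1_ne_nil l)
  | cons a t => simp

theorem intercalate_split1 (l : List Char) :
    [','].intercalate (split1 l) = l := by
  induction l with
  | nil => simp [split1, List.intercalate]
  | cons c rest ih =>
      by_cases hc : c = ','
      · subst hc
        simp only [split1, reduceIte]
        cases h1 : split1 rest with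
        | nil => exact absurd h1 (split1_ne_nil rest)
        | cons a t =>
            rw [h1] at ih
            rw [intercalate_cc]
            simpa using ih
      · simp only [split1, if_neg hc]
        cases h1 : split1 rest with
        | nil => exact absurd h1 (split1_ne_nil rest)
        | cons a t =>
            rw [h1] at ih
            cases t with
            | nil =>
                simp [List.intercalate] at ih ⊢
                simp [ih]
            | cons b t2 =>
                rw [List.modifyHead, intercalate_cc]
                rw [intercalate_cc] at ih
                simp [← ih]

-- Set.ofList keeps a sublist of its input …
theorem foldl_add_sublist (l : List String) :
    ∀ s : PySem.Set String, List.Sublist (List.foldl PySem.Set.add s l) (s ++ l) := by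
  induction l with
  | nil => intro s; simp [PySem.Set]
  | cons x xs ih =>
      intro s
      refine (ih (PySem.Set.add s x)).trans ?_
      by_cases h : x ∈ s
      · rw [PySem.Set.add_of_mem h]
        exact (List.append_sublist_append_left s).2 (List.sublist_cons_self x xs)
      · rw [PySem.Set.add_of_not_mem h]
        simp

-- … so A's length test is exactly a Nodup test
theorem ofList_len_iff (l : List String) :
    (PySem.Set.ofList l).length = l.length ↔ l.Nodup := by
  constructor
  · intro h
    have hs : List.Sublist (PySem.Set.ofList l) l := by simpa using foldl_add_sublist l PySem.Set.empty
    have heq := hs.eq_of_length (by simpa using h)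
    rw [← heq]
    exact PySem.Set.nodup_ofList l
  · intro h
    have heq := PySem.Set.update_eq_append_of_disjoint PySem.Set.empty l h
      (by intro x hx; simp [PySem.Set.empty, PySem.Set])
    have : PySem.Set.ofList l = l := by
      rw [show PySem.Set.ofList l = PySem.Set.update PySem.Set.empty l from rfl, heq]
      simp [PySem.Set.empty, PySem.Set]
    simp [this]

-- a non-empty duplicate-free list over the three devices is one of the 15
theorem enum3 (ms : List String) (hne : ms ≠ [])
    (h1 : ∀ x ∈ ms, x ∈ SUPPORTED_BOOT_DEVS) (h2 : ms.Nodup) : ms ∈ L15 := by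
  have hlen : ms.length ≤ SUPPORTED_BOOT_DEVS.length := (h2.subperm (fun x hx => h1 x hx)).length_le
  match ms, hne with
  | [a], _ =>
      have ha := h1 a (by simp)
      fin_cases ha <;> decide
  | [a,b], _ =>
      have ha := h1 a (by simp); have hb := h1 b (by simp)
      simp only [List.nodup_cons, List.mem_singleton] at h2
      fin_cases ha <;> fin_cases hb <;> simp_all <;> decide
  | [a,b,c], _ =>
      have ha := h1 a (by simp); have hb := h1 b (by simp); have hc := h1 c (by simp)
      simp only [List.nodup_cons, List.mem_cons, not_or] at h2
      fin_cases ha <;> fin_cases hb <;> fin_cases hc <;> simp_all <;> decide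
  | a::b::c::d::t, _ =>
      simp [SUPPORTED_BOOT_DEVS] at hlen
      omega

theorem pvALoop_eq_all (l : List String) :
    pvALoop l = l.all (fun d => SUPPORTED_BOOT_DEVS.contains d) := by
  induction l with
  | nil => rfl
  | cons d rest ih =>
      simp only [pvALoop, List.all_cons]
      simp [ih]


-- joining any of the 15 token lists gives the corresponding valid string
theorem join_L15 (ms : List String) (h : ms ∈ L15) :
    String.ofList ([','].intercalate (ms.map String.toList)) ∈ VALID15 := by
  fin_cases h <;> decide

-- every valid string passes A
theorem a_of_valid (s : String) (h : s ∈ VALID15) : is_valid_boot_option s = true := by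
  fin_cases h <;> decide

-- the split list of A is split1 of the characters
theorem a_split (s : String) :
    (PySem.Str.split? s ",").getD [] = (split1 s.toList).map String.ofList := by
  simp [PySem.Str.split?, PySem.Chars.split?]
  rw [splitOn_comma]

-- if A accepts s, s is one of the 15 valid strings
theorem valid_of_a (s : String) (h : is_valid_boot_option s = true) : s ∈ VALID15 := by
  unfold is_valid_boot_option at h
  rw [a_split] at h
  set ms : List String := (split1 s.toList).map String.ofList with hms
  by_cases hif : ms.length ≠ (PySem.Set.ofList ms).length
  · rw [if_pos hif] at h; exact absurd h (by simp)
  · rw [if_neg hif] at h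
    rw [not_not] at hif
    have hnodup : ms.Nodup := (ofList_len_iff ms).1 hif.symm
    have hsup : ∀ x ∈ ms, x ∈ SUPPORTED_BOOT_DEVS := by
      rw [pvALoop_eq_all] at h
      intro x hx
      have := List.all_eq_true.1 h x hx
      simpa using this
    have hne : ms ≠ [] := by
      rw [hms]
      cases h1 : split1 s.toList with
      | nil => exact absurd h1 (split1_ne_nil _)
      | cons a t => simp
    have hmem := enum3 ms hne hsup hnodup
    have hback : ms.map String.toList = split1 s.toList := by
      rw [hms, List.map_map]
      have : (String.toList ∘ String.ofList) = id := by
        funext l; simp [String.toList_ofList]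
      rw [this, List.map_id]
    have hs : s = String.ofList ([','].intercalate (ms.map String.toList)) := by
      rw [hback, intercalate_split1, String.ofList_toList]
    rw [hs]
    exact join_L15 ms hmem

-- B accepts exactly the 15 valid strings
theorem alt_iff (s : String) : is_valid_boot_option_alt s = true ↔ s ∈ VALID15 := by
  unfold is_valid_boot_option_alt pvVALID_BOOT_OPTIONS
  rw [show PySem.Set.contains (PySem.Set.ofList
    ["hd", "network", "cdrom",
     "hd,network", "hd,cdrom", "network,hd", "network,cdrom",
     "cdrom,hd", "cdrom,network",
     "hd,network,cdrom", "hd,cdrom,network",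
     "network,hd,cdrom", "network,cdrom,hd",
     "cdrom,hd,network", "cdrom,network,hd"] : PySem.Set String) s
      = List.contains (PySem.Set.ofList
    ["hd", "network", "cdrom",
     "hd,network", "hd,cdrom", "network,hd", "network,cdrom",
     "cdrom,hd", "cdrom,network",
     "hd,network,cdrom", "hd,cdrom,network",
     "network,hd,cdrom", "network,cdrom,hd",
     "cdrom,hd,network", "cdrom,network,hd"] : List String) s from rfl]
  rw [List.contains_iff_mem, PySem.Set.mem_ofList]
  rfl

theorem pv_main (s : String) : is_valid_boot_option s = is_valid_boot_option_alt s := by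
  by_cases h : s ∈ VALID15
  · rw [a_of_valid s h, ((alt_iff s).2 h).symm]
  · have ha : is_valid_boot_option s = false := by
      cases h1 : is_valid_boot_option s with
      | false => rfl
      | true => exact absurd (valid_of_a s h1) h
    have hb : is_valid_boot_option_alt s = false := by
      cases h2 : is_valid_boot_option_alt s with
      | false => rfl
      | true => exact absurd ((alt_iff s).1 h2) h
    rw [ha, hb]

-- ===== VERDICT (by name: the statement is the Claim_ definition above) =====
theorem is_valid_boot_option_spec : Claim_equal_is_valid_boot_option := by
  intro boot_option _
  unfold Spec_is_valid_boot_option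
  exact pv_main boot_option
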